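-- pv_equiv track=rewrite | github.com/SketchLife0/Web_python_developer | Погружение в Python/Seminar11/Task.py | __are_nested_lists_equal_size
-- ===== SOURCE A (Python) =====
-- def __are_nested_lists_equal_size(lst):
--     if not lst:
--         return True  # Пустой список считается равного размера
--
--     # Получите длину первого вложенного списка
--     first_len = len(lst[0])
--
--     # Проверьте длину всех остальных вложенных списков
--     for sub_lst in lst[1:]:
--         if len(sub_lst) != first_len:
--             return False  # Если длины разные, вернуть False
--
--     return True  # Если все длины равны, вернуть True
-- ===== SOURCE B (Python) =====
-- def __are_nested_lists_equal_size(lst):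
--     return len({len(sub) for sub in lst}) <= 1
-- ===== Notes on version B (the rewrite author's own statement) =====
-- stated objective: idiomatic
-- what changed: Replaces the pivot-then-loop early-return scan with a one-liner that collects the distinct sub-list lengths into a set and tests that it has at most one element.
import Mathlib
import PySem

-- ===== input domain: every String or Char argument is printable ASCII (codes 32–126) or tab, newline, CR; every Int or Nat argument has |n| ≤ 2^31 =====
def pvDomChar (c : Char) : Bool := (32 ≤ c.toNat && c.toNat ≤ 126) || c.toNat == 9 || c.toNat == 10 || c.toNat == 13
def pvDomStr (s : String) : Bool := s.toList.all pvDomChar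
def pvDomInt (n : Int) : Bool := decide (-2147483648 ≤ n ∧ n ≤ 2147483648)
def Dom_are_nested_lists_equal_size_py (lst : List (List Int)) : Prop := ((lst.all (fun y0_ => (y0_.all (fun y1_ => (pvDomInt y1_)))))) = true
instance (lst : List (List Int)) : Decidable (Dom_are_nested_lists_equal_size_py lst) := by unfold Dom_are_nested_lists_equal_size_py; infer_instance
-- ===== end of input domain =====

-- B is the idiomatic one-liner: dedup the sub-list lengths into a set and test |set| ≤ 1,
-- instead of A's compare-each-against-the-first early-return loop. Same cost, no speed claim.

-- ===== PORT A =====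
-- the 'for sub_lst in lst[1:]' loop with its early 'return False'
def pvALoop (first_len : Int) : List (List Int) → Bool
  | [] => true
  | sub_lst :: rest =>
      if (sub_lst.length : Int) ≠ first_len then false else pvALoop first_len rest

def are_nested_lists_equal_size_py (lst : List (List Int)) : Bool :=
  match lst with
  | [] => true                                  -- if not lst: return True
  | first :: rest =>
      let first_len : Int := first.length       -- first_len = len(lst[0])
      pvALoop first_len rest                    -- loop over lst[1:], then return True

-- ===== PORT B =====
def are_nested_lists_equal_size_py_alt (lst : List (List Int)) : Bool :=
  decide ((PySem.Set.ofList (lst.map (fun sub => (sub.length : Int)))).length ≤ 1)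

-- ===== PRECONDITION & SPEC =====
def Spec_are_nested_lists_equal_size_py (lst : List (List Int)) (out : Bool) : Prop := out = are_nested_lists_equal_size_py_alt lst
instance (lst : List (List Int)) (out : Bool) : Decidable (Spec_are_nested_lists_equal_size_py lst out) := by unfold Spec_are_nested_lists_equal_size_py; infer_instance

-- ===== CLAIM (what is proved, stated in full; the proofs are below) =====
def Claim_equal_are_nested_lists_equal_size_py : Prop := ∀ (lst : List (List Int)), Dom_are_nested_lists_equal_size_py lst → Spec_are_nested_lists_equal_size_py lst (are_nested_lists_equal_size_py lst)

-- ===== LEMMAS AND PROOFS =====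

theorem pvALoop_eq_all (a : Int) (l : List (List Int)) :
    pvALoop a l = l.all (fun s => (s.length : Int) == a) := by
  induction l with
  | nil => rfl
  | cons x xs ih =>
      simp only [pvALoop, List.all_cons, ih]
      by_cases h : (x.length : Int) = a <;> simp [h]

theorem set_len_le_one_iff (a : Int) (m : List Int) :
    (PySem.Set.ofList (a :: m)).length ≤ 1 ↔ ∀ x ∈ m, x = a := by
  rw [PySem.Set.ofList_cons, List.length_cons]
  have hlen : ((PySem.Set.ofList m).discard a).length + 1 ≤ 1 ↔
      (PySem.Set.ofList m).discard a = [] := by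
    rw [← List.length_eq_zero_iff]; omega
  rw [hlen, List.eq_nil_iff_forall_not_mem]
  simp only [PySem.Set.mem_discard, PySem.Set.mem_ofList, not_and, not_ne_iff]

-- ===== VERDICT (by name: the statement is the Claim_ definition above) =====
theorem are_nested_lists_equal_size_py_spec : Claim_equal_are_nested_lists_equal_size_py := by
  intro lst _
  unfold Spec_are_nested_lists_equal_size_py are_nested_lists_equal_size_py are_nested_lists_equal_size_py_alt
  match lst with
  | [] => rfl
  | first :: rest =>
      simp only [List.map_cons]
      rw [eq_comm, pvALoop_eq_all]
      rw [Bool.eq_iff_iff, decide_eq_true_iff, set_len_le_one_iff, List.all_eq_true]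
      constructor
      · intro h s hs
        simpa using h ((s.length : Int)) (List.mem_map_of_mem hs)
      · intro h x hx
        obtain ⟨s, hs, rfl⟩ := List.mem_map.mp hx
        simpa using h s hs
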